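-- pv_equiv track=rewrite | github.com/manateelazycat/lsp-bridge | core/handler/semantic_tokens.py | absolute_line_to_relative
-- ===== SOURCE A (Python) =====
-- def absolute_line_to_relative(tokens):
--     relative_tokens = []
--     cur_line = 0
--     delta_line = 0
--     for token in tokens:
--         delta_line = token[0] - cur_line
--         if token[0] != cur_line:
--             cur_line = token[0]
--         relative_tokens.append((delta_line, token[1], token[2], token[3], token[4]))
--
--     return relative_tokens
-- ===== SOURCE B (Python) =====
-- def absolute_line_to_relative(tokens):
--     lines = [t[0] for t in tokens]
--     prev = [0] + lines[:-1]
--     return [(t[0] - p, t[1], t[2], t[3], t[4]) for t, p in zip(tokens, prev)]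
-- ===== Notes on version B (the rewrite author's own statement) =====
-- stated objective: idiomatic
-- what changed: Replaced the running cur_line accumulator loop by materializing the shifted previous-line list ([0] + lines[:-1]) and emitting first differences via zip, with no mutable state.
import Mathlib
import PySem

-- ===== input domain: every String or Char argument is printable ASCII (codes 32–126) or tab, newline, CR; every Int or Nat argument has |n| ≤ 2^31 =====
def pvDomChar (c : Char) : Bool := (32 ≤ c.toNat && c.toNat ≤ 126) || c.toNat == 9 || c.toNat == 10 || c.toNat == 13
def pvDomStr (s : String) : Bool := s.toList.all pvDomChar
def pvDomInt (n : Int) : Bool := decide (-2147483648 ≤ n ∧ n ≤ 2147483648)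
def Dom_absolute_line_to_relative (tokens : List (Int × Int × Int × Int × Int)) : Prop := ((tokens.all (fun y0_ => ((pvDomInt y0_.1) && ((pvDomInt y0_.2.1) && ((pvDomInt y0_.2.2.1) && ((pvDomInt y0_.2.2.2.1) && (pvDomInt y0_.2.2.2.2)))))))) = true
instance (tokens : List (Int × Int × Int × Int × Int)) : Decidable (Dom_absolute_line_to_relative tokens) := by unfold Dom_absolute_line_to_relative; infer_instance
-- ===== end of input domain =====

-- B replaces A's running cur_line accumulator by an explicit shifted previous-line list zipped with the tokens (first differences); same return value, no mutable state.


-- ===== PORT A =====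
-- literal port of A: fold over tokens carrying (relative_tokens, cur_line)
def absolute_line_to_relative (tokens : List (Int × Int × Int × Int × Int)) : List (Int × Int × Int × Int × Int) :=
  (tokens.foldl
    (fun (st : List (Int × Int × Int × Int × Int) × Int) token =>
      let delta_line := token.1 - st.2
      let cur_line := if token.1 ≠ st.2 then token.1 else st.2
      (st.1 ++ [(delta_line, token.2.1, token.2.2.1, token.2.2.2.1, token.2.2.2.2)], cur_line))
    ([], 0)).1

-- ===== PORT B =====
-- literal port of B: shifted previous-line list, zipped with the tokens
def absolute_line_to_relative_alt (tokens : List (Int × Int × Int × Int × Int)) : List (Int × Int × Int × Int × Int) :=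
  let lines := tokens.map (·.1)
  let prev := 0 :: lines.dropLast
  (tokens.zip prev).map (fun tp => (tp.1.1 - tp.2, tp.1.2.1, tp.1.2.2.1, tp.1.2.2.2.1, tp.1.2.2.2.2))

-- ===== PRECONDITION & SPEC =====
def Spec_absolute_line_to_relative (tokens : List (Int × Int × Int × Int × Int)) (out : List (Int × Int × Int × Int × Int)) : Prop := out = absolute_line_to_relative_alt tokens
instance (tokens : List (Int × Int × Int × Int × Int)) (out : List (Int × Int × Int × Int × Int)) : Decidable (Spec_absolute_line_to_relative tokens out) := by unfold Spec_absolute_line_to_relative; infer_instance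

-- ===== CLAIM (what is proved, stated in full; the proofs are below) =====
def Claim_equal_absolute_line_to_relative : Prop := ∀ (tokens : List (Int × Int × Int × Int × Int)), Dom_absolute_line_to_relative tokens → Spec_absolute_line_to_relative tokens (absolute_line_to_relative tokens)

-- ===== LEMMAS AND PROOFS =====

-- zip truncates, so the dropLast in the shifted previous-line list is invisible to it
theorem pv_zip_dropLast (ts : List (Int × Int × Int × Int × Int)) (c : Int) :
    ts.zip (c :: (ts.map (·.1)).dropLast) = ts.zip (c :: ts.map (·.1)) := by
  induction ts generalizing c with
  | nil => rfl
  | cons t rest ih =>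
    cases rest with
    | nil => rfl
    | cons r rs =>
      simp only [List.map_cons, List.dropLast_cons₂, List.zip_cons_cons] at *
      rw [ih]

-- A's fold from state (acc, c) appends the first differences against (c :: lines)
theorem pv_foldA (ts : List (Int × Int × Int × Int × Int)) :
    ∀ (c : Int) (acc : List (Int × Int × Int × Int × Int)),
    (ts.foldl
      (fun (st : List (Int × Int × Int × Int × Int) × Int) token =>
        let delta_line := token.1 - st.2
        let cur_line := if token.1 ≠ st.2 then token.1 else st.2
        (st.1 ++ [(delta_line, token.2.1, token.2.2.1, token.2.2.2.1, token.2.2.2.2)], cur_line))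
      (acc, c)).1
    = acc ++ (ts.zip (c :: ts.map (·.1))).map
        (fun tp => (tp.1.1 - tp.2, tp.1.2.1, tp.1.2.2.1, tp.1.2.2.2.1, tp.1.2.2.2.2)) := by
  induction ts with
  | nil => intro c acc; simp
  | cons t rest ih =>
    intro c acc
    have hcur : (if t.1 ≠ c then t.1 else c) = t.1 := by
      by_cases h : t.1 = c <;> simp [h]
    simp only [List.foldl_cons, List.map_cons, List.zip_cons_cons, List.map]
    rw [hcur, ih t.1 (acc ++ [(t.1 - c, t.2.1, t.2.2.1, t.2.2.2.1, t.2.2.2.2)])]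
    simp

-- ===== VERDICT (by name: the statement is the Claim_ definition above) =====
theorem absolute_line_to_relative_spec : Claim_equal_absolute_line_to_relative := by
  intro tokens _
  unfold Spec_absolute_line_to_relative absolute_line_to_relative absolute_line_to_relative_alt
  rw [pv_foldA tokens 0 []]
  simp only [List.nil_append]
  rw [pv_zip_dropLast tokens 0]
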